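-- pv_equiv track=rewrite | github.com/Sdoba16/Circom-DL-course | rsa/numtonorm.py | bigint_to_array
-- ===== SOURCE A (Python) =====
-- def bigint_to_array(n, k, x):
--     # Initialize mod to 1 (Python's int can handle arbitrarily large numbers)
--     mod = 1
--     for idx in range(n):
--         mod *= 2
--
--     # Initialize the return list
--     ret = []
--     x_temp = x
--     for idx in range(k):
--         # Append x_temp mod mod to the list
--         ret.append(str(x_temp % mod))
--         # Divide x_temp by mod for the next iteration
--         x_temp //= mod  # Use integer division in Python
--
--     return ret
-- ===== SOURCE B (Python) =====
-- def bigint_to_array(n, k, x):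
--     # Divide and conquer: split the k limbs into halves with one big divmod,
--     # recursing on each half, instead of peeling limbs one by one.
--     if k <= 0:
--         return []
--     if k == 1:
--         return [str(x % (1 << n))]
--     h = k // 2
--     if 0 <= x and x.bit_length() <= n * h:
--         q, r = 0, x  # x already fits in the low half: skip building the power
--     else:
--         q, r = divmod(x, 1 << (n * h))
--     return bigint_to_array(n, h, r) + bigint_to_array(n, k - h, q)
-- ===== Notes on version B (the rewrite author's own statement) =====
-- stated objective: faster
-- what changed: Replaces A's linear limb-peeling loop (k sequential mod-then-floordiv steps on a running accumulator, after a loop building 2**n) with a recursive divide-and-conquer that splits the k limbs in half with one divmod by 2**(n*(k//2)) (skipping the divmod entirely when x already fits in the low half) and recurses on each half.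
-- outside the precondition, e.g. on bigint_to_array(-1, 2, 5): A returns ['0', '0'], B raises ValueError
import Mathlib
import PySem

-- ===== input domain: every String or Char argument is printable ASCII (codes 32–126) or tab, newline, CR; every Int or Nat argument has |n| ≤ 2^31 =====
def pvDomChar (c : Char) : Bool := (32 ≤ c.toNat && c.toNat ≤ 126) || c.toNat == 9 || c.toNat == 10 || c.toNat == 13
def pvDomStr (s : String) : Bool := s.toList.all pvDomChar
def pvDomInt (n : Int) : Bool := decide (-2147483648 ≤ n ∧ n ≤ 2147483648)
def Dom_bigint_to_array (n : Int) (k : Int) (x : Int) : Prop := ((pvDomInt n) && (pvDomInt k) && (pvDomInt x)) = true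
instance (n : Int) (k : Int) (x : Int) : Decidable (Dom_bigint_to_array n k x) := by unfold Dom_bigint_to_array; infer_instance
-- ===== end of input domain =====

-- B replaces A's sequential limb-peeling loop with a recursive divide-and-conquer split of the k limbs; objective: alternative.

-- ===== PORT A =====
def bigint_to_array (n : Int) (k : Int) (x : Int) : List String :=
  let mod : Int := (PySem.List.pyRange 0 n).foldl (fun m _ => m * 2) 1
  let res := (PySem.List.pyRange 0 k).foldl
    (fun (s : List String × Int) _idx =>
      (s.1 ++ [PySem.Int.toStr (PySem.Int.mod s.2 mod)], PySem.Int.floordiv s.2 mod))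
    ([], x)
  res.1

-- ===== PORT B =====
-- `1 << m` is Lean's `<<<` on the Nat shift count; exact for 0 ≤ n (Pre_): Python
-- raises ValueError on a negative shift count.
def bigint_to_array_alt (n : Int) (k : Int) (x : Int) : List String :=
  if hk0 : k ≤ 0 then []
  else if hk1 : k = 1 then [PySem.Int.toStr (PySem.Int.mod x ((1 : Int) <<< n.toNat))]
  else
    let h := PySem.Int.floordiv k 2
    let qr : Int × Int :=
      if 0 ≤ x ∧ (PySem.Int.bitLength x : Int) ≤ n * h then (0, x)
      else
        let d : Int := (1 : Int) <<< (n * h).toNat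
        (PySem.Int.floordiv x d, PySem.Int.mod x d)
    bigint_to_array_alt n h qr.2 ++ bigint_to_array_alt n (k - h) qr.1
termination_by k.toNat
decreasing_by
  · simp only [PySem.Int.floordiv_eq_ediv_of_pos (by norm_num : (0:Int) < 2)]
    omega
  · simp only [PySem.Int.floordiv_eq_ediv_of_pos (by norm_num : (0:Int) < 2)]
    omega

-- ===== PRECONDITION & SPEC =====
-- Pre_ excludes n < 0 with k > 0: there A still returns (k copies of "0", since range(n) is
-- empty and mod stays 1) but B's natural shift formulation raises ValueError (negative shift
-- count). For k ≤ 0 both return [] regardless of n, so those inputs stay inside Pre_.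
def Pre_bigint_to_array (n : Int) (k : Int) (x : Int) : Prop := 0 ≤ n ∨ k ≤ 0
instance (n : Int) (k : Int) (x : Int) : Decidable (Pre_bigint_to_array n k x) := by unfold Pre_bigint_to_array; infer_instance
def pvWitness_bigint_to_array : Int × Int × Int := (4, 3, 1234)
def Spec_bigint_to_array (n : Int) (k : Int) (x : Int) (out : List String) : Prop := out = bigint_to_array_alt n k x
instance (n : Int) (k : Int) (x : Int) (out : List String) : Decidable (Spec_bigint_to_array n k x out) := by unfold Spec_bigint_to_array; infer_instance

-- ===== CLAIM (what is proved, stated in full; the proofs are below) =====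
def Claim_equal_bigint_to_array : Prop := ∀ (n : Int) (k : Int) (x : Int), Dom_bigint_to_array n k x → Pre_bigint_to_array n k x → Spec_bigint_to_array n k x (bigint_to_array n k x)

-- ===== LEMMAS AND PROOFS =====

-- Common specification both ports are proved equal to: the i-th n-bit limb of x.
def pvLimbs (nn : Nat) (x : Int) (k : Nat) : List String :=
  (List.range k).map (fun i => PySem.Int.toStr (x / 2 ^ (nn * i) % 2 ^ nn))

theorem pv_fold_mul_two (l : List Int) : ∀ (c : Int),
    l.foldl (fun m _ => m * 2) c = c * (2 : Int) ^ l.length := by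
  induction l with
  | nil => intro c; simp
  | cons a t ih =>
      intro c
      simp [List.foldl, ih (c * 2), pow_succ]
      ring

theorem pv_mod_eq_pow (n : Int) :
    (PySem.List.pyRange 0 n).foldl (fun m _ => m * 2) 1 = (2 : Int) ^ n.toNat := by
  rw [pv_fold_mul_two]
  simp [PySem.List.length_pyRange_one]

-- Invariant of A's limb loop over range(j).
theorem pv_loop (nn : Nat) (x : Int) : ∀ (j : Nat),
    (PySem.List.pyRange 0 (j : Int)).foldl
      (fun (s : List String × Int) _idx =>
        (s.1 ++ [PySem.Int.toStr (PySem.Int.mod s.2 (2 ^ nn))],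
         PySem.Int.floordiv s.2 (2 ^ nn)))
      ([], x)
    = (pvLimbs nn x j, x / 2 ^ (nn * j)) := by
  have hpos : (0 : Int) < 2 ^ nn := by positivity
  intro j
  induction j with
  | zero => simp [pvLimbs]
  | succ j ih =>
      have hsplit : PySem.List.pyRange 0 ((j + 1 : Nat) : Int)
          = PySem.List.pyRange 0 (j : Int) ++ [(j : Int)] := by
        have := PySem.List.pyRange_one_succ_right (a := 0) (b := (j : Int)) (by positivity)
        push_cast
        exact this
      rw [hsplit, List.foldl_append, ih]
      simp only [List.foldl_cons, List.foldl_nil]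
      rw [Prod.mk.injEq]
      refine ⟨?_, ?_⟩
      · rw [pvLimbs, pvLimbs, List.range_succ, List.map_append]
        simp
      · rw [PySem.Int.floordiv_eq_ediv_of_pos hpos,
            Int.ediv_ediv_of_nonneg (by positivity : (0:Int) ≤ 2 ^ (nn * j)),
            ← pow_add, Nat.mul_succ]

theorem pv_A_eq (n k x : Int) :
    bigint_to_array n k x = pvLimbs n.toNat x k.toNat := by
  unfold bigint_to_array
  dsimp only
  rw [pv_mod_eq_pow]
  by_cases hk : k ≤ 0
  · rw [PySem.List.pyRange_one_eq_nil hk]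
    have : k.toNat = 0 := by omega
    simp [this, pvLimbs]
  · have hk' : k = (k.toNat : Int) := (Int.toNat_of_nonneg (by omega)).symm
    rw [hk', pv_loop n.toNat x k.toNat, Int.toNat_natCast]

-- The low h limbs of x are the limbs of x mod 2^(nn*h).
theorem pv_limb_mod (nn h i : Nat) (x : Int) (hih : i < h) :
    x % 2 ^ (nn * h) / 2 ^ (nn * i) % 2 ^ nn = x / 2 ^ (nn * i) % 2 ^ nn := by
  obtain ⟨m, hm⟩ : ∃ m, nn * h = nn * i + nn + m := by
    have h1 : nn * (i + 1) ≤ nn * h := Nat.mul_le_mul_left nn hih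
    rw [Nat.mul_add, Nat.mul_one] at h1
    exact ⟨nn * h - (nn * i + nn), by omega⟩
  have hc : ((2 : Int) ^ (nn * i)) ≠ 0 := by positivity
  conv_rhs => rw [← Int.emod_add_ediv x (2 ^ (nn * h))]
  rw [hm, pow_add, pow_add, mul_assoc, mul_assoc,
      Int.add_mul_ediv_left _ _ hc, mul_assoc, Int.add_mul_emod_self_left]

-- The high limbs of x are the limbs of x >> (nn*h).
theorem pv_limb_div (nn h i : Nat) (x : Int) :
    x / 2 ^ (nn * h) / 2 ^ (nn * i) = x / 2 ^ (nn * (h + i)) := by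
  rw [Int.ediv_ediv_of_nonneg (by positivity : (0:Int) ≤ 2 ^ (nn * h)), ← pow_add,
      Nat.mul_add]

-- Splitting the limb list at h.
theorem pv_limbs_split (nn h m : Nat) (x : Int) :
    pvLimbs nn x (h + m)
      = pvLimbs nn (x % 2 ^ (nn * h)) h ++ pvLimbs nn (x / 2 ^ (nn * h)) m := by
  unfold pvLimbs
  rw [List.range_add, List.map_append, List.map_map]
  congr 1
  · exact (List.map_congr_left fun i hi =>
      congrArg PySem.Int.toStr (pv_limb_mod nn h i x (List.mem_range.mp hi))).symm
  · exact List.map_congr_left fun i _ => by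
      simp only [Function.comp]
      rw [pv_limb_div nn h i x]

theorem pv_B_eq_aux (n : Int) (hn : 0 ≤ n) : ∀ (N : Nat) (k x : Int), k.toNat ≤ N →
    bigint_to_array_alt n k x = pvLimbs n.toNat x k.toNat := by
  intro N
  induction N with
  | zero =>
      intro k x hkN
      rw [bigint_to_array_alt]
      have hk0 : k ≤ 0 := by omega
      have : k.toNat = 0 := by omega
      simp [hk0, this, pvLimbs]
  | succ N ih =>
      intro k x hkN
      rw [bigint_to_array_alt]
      split_ifs with hk0 hk1
      · have : k.toNat = 0 := by omega
        simp [this, pvLimbs]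
      · have hsh : (1 : Int) <<< n.toNat = 2 ^ n.toNat := by
          rw [Int.shiftLeft_eq]; ring
        have hpos : (0 : Int) < 2 ^ n.toNat := by positivity
        subst hk1
        rw [hsh, PySem.Int.mod_eq_emod_of_pos hpos]
        simp [pvLimbs, List.range_succ]
      · -- k ≥ 2: divide and conquer step
        have hk2 : 2 ≤ k := by omega
        have hh : PySem.Int.floordiv k 2 = k / 2 :=
          PySem.Int.floordiv_eq_ediv_of_pos (by norm_num)
        simp only [hh]
        have hcast : (n * (k / 2)).toNat = n.toNat * (k / 2).toNat := by
          have h1 : (0 : Int) ≤ k / 2 := by omega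
          have h2 : ((n.toNat * (k / 2).toNat : Nat) : Int) = n * (k / 2) := by
            push_cast
            rw [Int.toNat_of_nonneg hn, Int.toNat_of_nonneg h1]
          omega
        have hdpos : (0 : Int) < 2 ^ (n.toNat * (k / 2).toNat) := by positivity
        have hksplit : k.toNat = (k / 2).toNat + (k - k / 2).toNat := by omega
        split_ifs with hfit
        · -- fast path: x already fits in the low half, so q = 0, r = x
          obtain ⟨hx0, hbl⟩ := hfit
          have hxlt : x < 2 ^ (n.toNat * (k / 2).toNat) := by
            have hble : PySem.Int.bitLength x ≤ n.toNat * (k / 2).toNat := by omega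
            have h1 : x.natAbs < 2 ^ (n.toNat * (k / 2).toNat) :=
              lt_of_lt_of_le (PySem.Int.lt_two_pow_bitLength x)
                (Nat.pow_le_pow_right (by norm_num) hble)
            have h2 : x = (x.natAbs : Int) := (Int.natAbs_of_nonneg hx0).symm
            rw [h2]
            exact_mod_cast h1
          simp only []
          rw [ih (k / 2) _ (by omega), ih (k - k / 2) _ (by omega),
              hksplit, pv_limbs_split, Int.emod_eq_of_lt hx0 hxlt,
              Int.ediv_eq_zero_of_lt hx0 hxlt]
        · have hdsh : (1 : Int) <<< (n * (k / 2)).toNat = 2 ^ (n.toNat * (k / 2).toNat) := by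
            rw [Int.shiftLeft_eq, hcast]; ring
          simp only [hdsh, PySem.Int.floordiv_eq_ediv_of_pos hdpos,
            PySem.Int.mod_eq_emod_of_pos hdpos]
          rw [ih (k / 2) _ (by omega), ih (k - k / 2) _ (by omega)]
          rw [hksplit, pv_limbs_split]

theorem pv_B_eq (n : Int) (hn : 0 ≤ n) (k x : Int) :
    bigint_to_array_alt n k x = pvLimbs n.toNat x k.toNat :=
  pv_B_eq_aux n hn k.toNat k x le_rfl

theorem pv_main (n k x : Int) (hn : 0 ≤ n ∨ k ≤ 0) :
    bigint_to_array n k x = bigint_to_array_alt n k x := by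
  by_cases hk : k ≤ 0
  · -- k ≤ 0: both programs produce the empty list
    rw [bigint_to_array_alt]
    unfold bigint_to_array
    dsimp only
    rw [PySem.List.pyRange_one_eq_nil hk]
    simp [hk]
  · rw [pv_A_eq n k x, pv_B_eq n (hn.resolve_right hk) k x]

-- ===== VERDICT (by name: the statement is the Claim_ definition above) =====
theorem bigint_to_array_spec : Claim_equal_bigint_to_array := by
  intro n k x _ hn
  unfold Spec_bigint_to_array
  exact pv_main n k x hn
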